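-- pv_equiv track=rewrite | github.com/renancarranza1920/restobar | app/services.py | expand_legacy_permissions
-- ===== SOURCE A (Python) =====
-- MODULE_PERMISSION_ALIASES = {
--     "dashboard": "dashboard.view",
--     "mesas": "mesas.view",
--     "zonas": "zonas.view",
--     "categorias": "categorias.view",
--     "ordenes": "ordenes.view",
--     "productos": "productos.view",
--     "caja": "caja.view",
--     "cocina": "cocina.view",
--     "inventario": "inventario.view",
--     "usuarios": "usuarios.view",
--     "reportes": "reportes.view",
--     "auditoria": "auditoria.view",
-- }
--
-- PERMISSION_DEFINITIONS = [
--     {"key": "dashboard.view", "label": "Ver inicio", "description": "Ver el panel inicial adaptado al rol.", "group": "General"},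
--     {"key": "mesas.view", "label": "Ver mesas", "description": "Consultar mesas, zonas ocupadas y limpieza.", "group": "Mesas"},
--     {"key": "mesas.create", "label": "Crear mesas", "description": "Registrar nuevas mesas.", "group": "Mesas"},
--     {"key": "mesas.edit", "label": "Editar mesas", "description": "Cambiar datos y estado de limpieza.", "group": "Mesas"},
--     {"key": "mesas.delete", "label": "Eliminar mesas", "description": "Borrar mesas sin historial.", "group": "Mesas"},
--     {"key": "zonas.view", "label": "Ver zonas", "description": "Consultar zonas del restaurante.", "group": "Configuracion"},
--     {"key": "zonas.create", "label": "Crear zonas", "description": "Registrar nuevas zonas.", "group": "Configuracion"},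
--     {"key": "zonas.edit", "label": "Editar zonas", "description": "Actualizar nombres de zonas.", "group": "Configuracion"},
--     {"key": "zonas.delete", "label": "Eliminar zonas", "description": "Borrar zonas sin mesas asociadas.", "group": "Configuracion"},
--     {"key": "categorias.view", "label": "Ver categorias", "description": "Consultar grupos de productos.", "group": "Catalogo"},
--     {"key": "categorias.create", "label": "Crear categorias", "description": "Registrar nuevas categorias.", "group": "Catalogo"},
--     {"key": "categorias.edit", "label": "Editar categorias", "description": "Actualizar categorias y cocina.", "group": "Catalogo"},
--     {"key": "categorias.delete", "label": "Eliminar categorias", "description": "Borrar categorias sin productos.", "group": "Catalogo"},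
--     {"key": "productos.view", "label": "Ver productos", "description": "Consultar catalogo, precios y disponibilidad.", "group": "Catalogo"},
--     {"key": "productos.create", "label": "Crear productos", "description": "Registrar nuevos productos.", "group": "Catalogo"},
--     {"key": "productos.edit", "label": "Editar productos", "description": "Actualizar datos, precios e imagenes.", "group": "Catalogo"},
--     {"key": "productos.availability", "label": "Cambiar disponibilidad", "description": "Marcar productos como disponibles o agotados.", "group": "Catalogo"},
--     {"key": "productos.delete", "label": "Eliminar productos", "description": "Borrar productos sin historial.", "group": "Catalogo"},
--     {"key": "ordenes.view", "label": "Ver ordenes", "description": "Consultar ordenes y detalle.", "group": "Ordenes"},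
--     {"key": "ordenes.create", "label": "Crear ordenes", "description": "Abrir ordenes de mesa o para llevar.", "group": "Ordenes"},
--     {"key": "ordenes.items", "label": "Agregar productos", "description": "Agregar items a ordenes abiertas.", "group": "Ordenes"},
--     {"key": "ordenes.deliver", "label": "Entregar items", "description": "Marcar productos listos como entregados.", "group": "Ordenes"},
--     {"key": "ordenes.cancel_item", "label": "Cancelar items", "description": "Cancelar items no cobrados.", "group": "Ordenes"},
--     {"key": "ordenes.ticket", "label": "Ver tickets", "description": "Abrir tickets de venta o cocina.", "group": "Ordenes"},
--     {"key": "caja.view", "label": "Ver caja", "description": "Consultar caja, sesiones y movimientos.", "group": "Caja"},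
--     {"key": "caja.open", "label": "Abrir caja", "description": "Iniciar sesion de caja.", "group": "Caja"},
--     {"key": "caja.close", "label": "Cerrar caja", "description": "Cerrar sesion de caja.", "group": "Caja"},
--     {"key": "caja.movements", "label": "Movimientos de caja", "description": "Registrar ingresos y egresos manuales.", "group": "Caja"},
--     {"key": "caja.charge", "label": "Cobrar ordenes", "description": "Registrar pagos y cuentas divididas.", "group": "Caja"},
--     {"key": "caja.cancel_order", "label": "Cancelar ordenes", "description": "Cancelar ordenes abiertas sin pagos.", "group": "Caja"},
--     {"key": "cocina.view", "label": "Ver cocina", "description": "Consultar comandas pendientes.", "group": "Cocina"},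
--     {"key": "cocina.prepare", "label": "Preparar comandas", "description": "Marcar items de cocina como listos/entregados.", "group": "Cocina"},
--     {"key": "inventario.view", "label": "Ver inventario", "description": "Consultar stock y movimientos.", "group": "Inventario"},
--     {"key": "inventario.create", "label": "Registrar movimientos", "description": "Crear compras, ventas y ajustes.", "group": "Inventario"},
--     {"key": "reportes.view", "label": "Ver reportes", "description": "Consultar reportes operativos y financieros.", "group": "Reportes"},
--     {"key": "reportes.export", "label": "Exportar reportes", "description": "Descargar CSV y PDF.", "group": "Reportes"},
--     {"key": "usuarios.view", "label": "Ver usuarios", "description": "Consultar cuentas y roles.", "group": "Seguridad"},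
--     {"key": "usuarios.create", "label": "Crear usuarios", "description": "Registrar cuentas nuevas.", "group": "Seguridad"},
--     {"key": "usuarios.edit", "label": "Editar usuarios", "description": "Actualizar datos, roles y estado.", "group": "Seguridad"},
--     {"key": "usuarios.delete", "label": "Eliminar usuarios", "description": "Eliminar cuentas sin movimientos.", "group": "Seguridad"},
--     {"key": "usuarios.reset_password", "label": "Resetear contrasenas", "description": "Cambiar contrasenas de otros usuarios.", "group": "Seguridad"},
--     {"key": "roles.view", "label": "Ver roles", "description": "Consultar roles y permisos.", "group": "Seguridad"},
--     {"key": "roles.create", "label": "Crear roles", "description": "Crear roles personalizados.", "group": "Seguridad"},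
--     {"key": "roles.edit", "label": "Editar roles", "description": "Modificar permisos de roles.", "group": "Seguridad"},
--     {"key": "roles.delete", "label": "Eliminar roles", "description": "Eliminar roles sin usuarios.", "group": "Seguridad"},
--     {"key": "security.change_password", "label": "Cambiar contrasena propia", "description": "Actualizar la contrasena de la cuenta actual.", "group": "Seguridad"},
--     {"key": "auditoria.view", "label": "Ver auditoria", "description": "Consultar cambios importantes del sistema.", "group": "Auditoria"},
-- ]
--
-- ALL_PERMISSION_KEYS = {permission["key"] for permission in PERMISSION_DEFINITIONS}
--
-- def expand_legacy_permissions(values):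
--     expanded = set()
--     for value in values or []:
--         value = str(value).strip()
--         if not value:
--             continue
--         if value in MODULE_PERMISSION_ALIASES:
--             prefix = f"{value}."
--             expanded.update(
--                 permission["key"]
--                 for permission in PERMISSION_DEFINITIONS
--                 if permission["key"].startswith(prefix)
--             )
--         elif value in ALL_PERMISSION_KEYS:
--             expanded.add(value)
--     return expanded
-- ===== SOURCE B (Python) =====
-- # Catalogue kept as compact per-module lines ("module action action ..."); expansion is a
-- # flatten-then-dedup pipeline over a module table instead of A's per-value set mutation
-- # with a scan of the PERMISSION_DEFINITIONS records.
--
-- MODULE_LINES = [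
--     "dashboard view",
--     "mesas view create edit delete",
--     "zonas view create edit delete",
--     "categorias view create edit delete",
--     "productos view create edit availability delete",
--     "ordenes view create items deliver cancel_item ticket",
--     "caja view open close movements charge cancel_order",
--     "cocina view prepare",
--     "inventario view create",
--     "reportes view export",
--     "usuarios view create edit delete reset_password",
--     "roles view create edit delete",
--     "security change_password",
--     "auditoria view",
-- ]
--
-- # permission groups that never had a legacy module alias
-- NON_ALIASED = ("roles", "security")
--
-- PERM_TABLE = []
-- for _line in MODULE_LINES:
--     _module, *_actions = _line.split()
--     PERM_TABLE.append((_module, [_module + "." + a for a in _actions]))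
--
-- PERM_KEYS = [k for _, ks in PERM_TABLE for k in ks]
--
--
-- def _expansion(token):
--     for module, keys in PERM_TABLE:
--         if token == module:
--             return [] if module in NON_ALIASED else keys
--     if token in PERM_KEYS:
--         return [token]
--     return []
--
--
-- def expand_legacy_permissions(values):
--     hits = [k for v in (values or []) for k in _expansion(str(v).strip())]
--     return set(hits)
-- ===== Notes on version B (the rewrite author's own statement) =====
-- stated objective: alternative
-- what changed: B derives the catalogue from compact per-module line strings ('module action action ...') split at import into a module->keys table, and expands by looking the token up in that table (alias hit -> the module's key group, exact-key hit -> itself), concatenating all contributions and deduplicating once at the end, instead of A's per-value branching over an alias dict plus a startswith scan of the PERMISSION_DEFINITIONS records with incremental set mutation.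
import Mathlib
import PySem

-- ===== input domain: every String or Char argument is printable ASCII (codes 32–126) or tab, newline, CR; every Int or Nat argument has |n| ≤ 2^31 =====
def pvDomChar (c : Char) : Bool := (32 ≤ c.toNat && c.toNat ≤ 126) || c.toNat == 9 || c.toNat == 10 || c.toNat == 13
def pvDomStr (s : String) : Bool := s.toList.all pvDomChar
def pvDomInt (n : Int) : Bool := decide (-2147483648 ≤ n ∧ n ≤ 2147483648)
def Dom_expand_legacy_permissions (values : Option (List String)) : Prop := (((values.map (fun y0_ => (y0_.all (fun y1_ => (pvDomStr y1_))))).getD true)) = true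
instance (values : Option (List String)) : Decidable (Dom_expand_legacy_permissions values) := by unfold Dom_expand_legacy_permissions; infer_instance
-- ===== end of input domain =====

-- B keeps the catalogue as compact per-module line strings and expands by a flatten-then-dedup
-- pipeline over a module table, instead of A's per-value set mutation with a scan of the
-- PERMISSION_DEFINITIONS records; result is a Python set (PySem.Set, compared as a set).
-- ===== PORT A =====
def MODULE_PERMISSION_ALIASES : PySem.Dict String String := PySem.Dict.mk [("dashboard", "dashboard.view"), ("mesas", "mesas.view"), ("zonas", "zonas.view"), ("categorias", "categorias.view"), ("ordenes", "ordenes.view"), ("productos", "productos.view"), ("caja", "caja.view"), ("cocina", "cocina.view"), ("inventario", "inventario.view"), ("usuarios", "usuarios.view"), ("reportes", "reportes.view"), ("auditoria", "auditoria.view")]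

def PERMISSION_DEFINITIONS : List (PySem.Dict String String) := [
  PySem.Dict.mk [("key", "dashboard.view"), ("label", "Ver inicio"), ("description", "Ver el panel inicial adaptado al rol."), ("group", "General")],
  PySem.Dict.mk [("key", "mesas.view"), ("label", "Ver mesas"), ("description", "Consultar mesas, zonas ocupadas y limpieza."), ("group", "Mesas")],
  PySem.Dict.mk [("key", "mesas.create"), ("label", "Crear mesas"), ("description", "Registrar nuevas mesas."), ("group", "Mesas")],
  PySem.Dict.mk [("key", "mesas.edit"), ("label", "Editar mesas"), ("description", "Cambiar datos y estado de limpieza."), ("group", "Mesas")],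
  PySem.Dict.mk [("key", "mesas.delete"), ("label", "Eliminar mesas"), ("description", "Borrar mesas sin historial."), ("group", "Mesas")],
  PySem.Dict.mk [("key", "zonas.view"), ("label", "Ver zonas"), ("description", "Consultar zonas del restaurante."), ("group", "Configuracion")],
  PySem.Dict.mk [("key", "zonas.create"), ("label", "Crear zonas"), ("description", "Registrar nuevas zonas."), ("group", "Configuracion")],
  PySem.Dict.mk [("key", "zonas.edit"), ("label", "Editar zonas"), ("description", "Actualizar nombres de zonas."), ("group", "Configuracion")],
  PySem.Dict.mk [("key", "zonas.delete"), ("label", "Eliminar zonas"), ("description", "Borrar zonas sin mesas asociadas."), ("group", "Configuracion")],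
  PySem.Dict.mk [("key", "categorias.view"), ("label", "Ver categorias"), ("description", "Consultar grupos de productos."), ("group", "Catalogo")],
  PySem.Dict.mk [("key", "categorias.create"), ("label", "Crear categorias"), ("description", "Registrar nuevas categorias."), ("group", "Catalogo")],
  PySem.Dict.mk [("key", "categorias.edit"), ("label", "Editar categorias"), ("description", "Actualizar categorias y cocina."), ("group", "Catalogo")],
  PySem.Dict.mk [("key", "categorias.delete"), ("label", "Eliminar categorias"), ("description", "Borrar categorias sin productos."), ("group", "Catalogo")],
  PySem.Dict.mk [("key", "productos.view"), ("label", "Ver productos"), ("description", "Consultar catalogo, precios y disponibilidad."), ("group", "Catalogo")],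
  PySem.Dict.mk [("key", "productos.create"), ("label", "Crear productos"), ("description", "Registrar nuevos productos."), ("group", "Catalogo")],
  PySem.Dict.mk [("key", "productos.edit"), ("label", "Editar productos"), ("description", "Actualizar datos, precios e imagenes."), ("group", "Catalogo")],
  PySem.Dict.mk [("key", "productos.availability"), ("label", "Cambiar disponibilidad"), ("description", "Marcar productos como disponibles o agotados."), ("group", "Catalogo")],
  PySem.Dict.mk [("key", "productos.delete"), ("label", "Eliminar productos"), ("description", "Borrar productos sin historial."), ("group", "Catalogo")],
  PySem.Dict.mk [("key", "ordenes.view"), ("label", "Ver ordenes"), ("description", "Consultar ordenes y detalle."), ("group", "Ordenes")],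
  PySem.Dict.mk [("key", "ordenes.create"), ("label", "Crear ordenes"), ("description", "Abrir ordenes de mesa o para llevar."), ("group", "Ordenes")],
  PySem.Dict.mk [("key", "ordenes.items"), ("label", "Agregar productos"), ("description", "Agregar items a ordenes abiertas."), ("group", "Ordenes")],
  PySem.Dict.mk [("key", "ordenes.deliver"), ("label", "Entregar items"), ("description", "Marcar productos listos como entregados."), ("group", "Ordenes")],
  PySem.Dict.mk [("key", "ordenes.cancel_item"), ("label", "Cancelar items"), ("description", "Cancelar items no cobrados."), ("group", "Ordenes")],
  PySem.Dict.mk [("key", "ordenes.ticket"), ("label", "Ver tickets"), ("description", "Abrir tickets de venta o cocina."), ("group", "Ordenes")],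
  PySem.Dict.mk [("key", "caja.view"), ("label", "Ver caja"), ("description", "Consultar caja, sesiones y movimientos."), ("group", "Caja")],
  PySem.Dict.mk [("key", "caja.open"), ("label", "Abrir caja"), ("description", "Iniciar sesion de caja."), ("group", "Caja")],
  PySem.Dict.mk [("key", "caja.close"), ("label", "Cerrar caja"), ("description", "Cerrar sesion de caja."), ("group", "Caja")],
  PySem.Dict.mk [("key", "caja.movements"), ("label", "Movimientos de caja"), ("description", "Registrar ingresos y egresos manuales."), ("group", "Caja")],
  PySem.Dict.mk [("key", "caja.charge"), ("label", "Cobrar ordenes"), ("description", "Registrar pagos y cuentas divididas."), ("group", "Caja")],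
  PySem.Dict.mk [("key", "caja.cancel_order"), ("label", "Cancelar ordenes"), ("description", "Cancelar ordenes abiertas sin pagos."), ("group", "Caja")],
  PySem.Dict.mk [("key", "cocina.view"), ("label", "Ver cocina"), ("description", "Consultar comandas pendientes."), ("group", "Cocina")],
  PySem.Dict.mk [("key", "cocina.prepare"), ("label", "Preparar comandas"), ("description", "Marcar items de cocina como listos/entregados."), ("group", "Cocina")],
  PySem.Dict.mk [("key", "inventario.view"), ("label", "Ver inventario"), ("description", "Consultar stock y movimientos."), ("group", "Inventario")],
  PySem.Dict.mk [("key", "inventario.create"), ("label", "Registrar movimientos"), ("description", "Crear compras, ventas y ajustes."), ("group", "Inventario")],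
  PySem.Dict.mk [("key", "reportes.view"), ("label", "Ver reportes"), ("description", "Consultar reportes operativos y financieros."), ("group", "Reportes")],
  PySem.Dict.mk [("key", "reportes.export"), ("label", "Exportar reportes"), ("description", "Descargar CSV y PDF."), ("group", "Reportes")],
  PySem.Dict.mk [("key", "usuarios.view"), ("label", "Ver usuarios"), ("description", "Consultar cuentas y roles."), ("group", "Seguridad")],
  PySem.Dict.mk [("key", "usuarios.create"), ("label", "Crear usuarios"), ("description", "Registrar cuentas nuevas."), ("group", "Seguridad")],
  PySem.Dict.mk [("key", "usuarios.edit"), ("label", "Editar usuarios"), ("description", "Actualizar datos, roles y estado."), ("group", "Seguridad")],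
  PySem.Dict.mk [("key", "usuarios.delete"), ("label", "Eliminar usuarios"), ("description", "Eliminar cuentas sin movimientos."), ("group", "Seguridad")],
  PySem.Dict.mk [("key", "usuarios.reset_password"), ("label", "Resetear contrasenas"), ("description", "Cambiar contrasenas de otros usuarios."), ("group", "Seguridad")],
  PySem.Dict.mk [("key", "roles.view"), ("label", "Ver roles"), ("description", "Consultar roles y permisos."), ("group", "Seguridad")],
  PySem.Dict.mk [("key", "roles.create"), ("label", "Crear roles"), ("description", "Crear roles personalizados."), ("group", "Seguridad")],
  PySem.Dict.mk [("key", "roles.edit"), ("label", "Editar roles"), ("description", "Modificar permisos de roles."), ("group", "Seguridad")],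
  PySem.Dict.mk [("key", "roles.delete"), ("label", "Eliminar roles"), ("description", "Eliminar roles sin usuarios."), ("group", "Seguridad")],
  PySem.Dict.mk [("key", "security.change_password"), ("label", "Cambiar contrasena propia"), ("description", "Actualizar la contrasena de la cuenta actual."), ("group", "Seguridad")],
  PySem.Dict.mk [("key", "auditoria.view"), ("label", "Ver auditoria"), ("description", "Consultar cambios importantes del sistema."), ("group", "Auditoria")]]

def ALL_PERMISSION_KEYS : PySem.Set String :=
  PySem.Set.ofList (PERMISSION_DEFINITIONS.map (fun p => PySem.Dict.getD p "key" ""))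

def expand_legacy_permissions (values : Option (List String)) : List String :=
  (match values with | none => [] | some l => l).foldl
    (fun expanded value0 =>
      let value := PySem.Str.strip value0
      if value = "" then expanded
      else if PySem.Dict.contains MODULE_PERMISSION_ALIASES value then
        PySem.Set.update expanded
          ((PERMISSION_DEFINITIONS.filter
              (fun p => PySem.Str.startswith (PySem.Dict.getD p "key" "") (value ++ "."))).map
            (fun p => PySem.Dict.getD p "key" ""))
      else if PySem.Set.contains ALL_PERMISSION_KEYS value then
        PySem.Set.add expanded value
      else expanded)
    PySem.Set.empty

-- ===== PORT B =====
-- catalogue as compact per-module lines: "module action action ..."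
def MODULE_LINES : List String := ["dashboard view", "mesas view create edit delete", "zonas view create edit delete", "categorias view create edit delete", "productos view create edit availability delete", "ordenes view create items deliver cancel_item ticket", "caja view open close movements charge cancel_order", "cocina view prepare", "inventario view create", "reportes view export", "usuarios view create edit delete reset_password", "roles view create edit delete", "security change_password", "auditoria view"]

-- permission groups that never had a legacy module alias
def NON_ALIASED : List String := ["roles", "security"]

-- 'module, *actions = line.split()' (the [] branch is unreachable: every line is nonempty)
def PERM_TABLE : List (String × List String) :=
  MODULE_LINES.foldl (fun t line =>
    match PySem.Str.split₀ line with
    | [] => t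
    | module :: actions => t ++ [(module, actions.map (fun a => module ++ "." ++ a))]) []

def PERM_KEYS : List String := PERM_TABLE.flatMap (fun p => p.2)

-- the early-returning for-loop of _expansion
def pvFindModule (token : String) : List (String × List String) → Option (List String)
  | [] => none
  | (m, ks) :: rest =>
      if token == m then some (if NON_ALIASED.contains m then [] else ks)
      else pvFindModule token rest

def pvExpansion (token : String) : List String :=
  match pvFindModule token PERM_TABLE with
  | some ks => ks
  | none => if PERM_KEYS.contains token then [token] else []

def expand_legacy_permissions_alt (values : Option (List String)) : List String :=
  PySem.Set.ofList ((values.getD []).flatMap (fun v => pvExpansion (PySem.Str.strip v)))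

-- ===== PRECONDITION & SPEC =====
def Spec_expand_legacy_permissions (values : Option (List String)) (out : List String) : Prop := out = expand_legacy_permissions_alt values
instance (values : Option (List String)) (out : List String) : Decidable (Spec_expand_legacy_permissions values out) := by unfold Spec_expand_legacy_permissions; infer_instance

-- ===== CLAIM (what is proved, stated in full; the proofs are below) =====
def Claim_equal_expand_legacy_permissions : Prop := ∀ (values : Option (List String)), Dom_expand_legacy_permissions values → Spec_expand_legacy_permissions values (expand_legacy_permissions values)

-- ===== LEMMAS AND PROOFS =====
set_option maxRecDepth 20000
set_option maxHeartbeats 2000000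

-- evaluated forms of the constant tables (proved once, so later cases never re-reduce them)
theorem hKeys : PERMISSION_DEFINITIONS.map (fun p => PySem.Dict.getD p "key" "") = ["dashboard.view", "mesas.view", "mesas.create", "mesas.edit", "mesas.delete", "zonas.view", "zonas.create", "zonas.edit", "zonas.delete", "categorias.view", "categorias.create", "categorias.edit", "categorias.delete", "productos.view", "productos.create", "productos.edit", "productos.availability", "productos.delete", "ordenes.view", "ordenes.create", "ordenes.items", "ordenes.deliver", "ordenes.cancel_item", "ordenes.ticket", "caja.view", "caja.open", "caja.close", "caja.movements", "caja.charge", "caja.cancel_order", "cocina.view", "cocina.prepare", "inventario.view", "inventario.create", "reportes.view", "reportes.export", "usuarios.view", "usuarios.create", "usuarios.edit", "usuarios.delete", "usuarios.reset_password", "roles.view", "roles.create", "roles.edit", "roles.delete", "security.change_password", "auditoria.view"] := by decide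

theorem hAK : ALL_PERMISSION_KEYS = ["dashboard.view", "mesas.view", "mesas.create", "mesas.edit", "mesas.delete", "zonas.view", "zonas.create", "zonas.edit", "zonas.delete", "categorias.view", "categorias.create", "categorias.edit", "categorias.delete", "productos.view", "productos.create", "productos.edit", "productos.availability", "productos.delete", "ordenes.view", "ordenes.create", "ordenes.items", "ordenes.deliver", "ordenes.cancel_item", "ordenes.ticket", "caja.view", "caja.open", "caja.close", "caja.movements", "caja.charge", "caja.cancel_order", "cocina.view", "cocina.prepare", "inventario.view", "inventario.create", "reportes.view", "reportes.export", "usuarios.view", "usuarios.create", "usuarios.edit", "usuarios.delete", "usuarios.reset_password", "roles.view", "roles.create", "roles.edit", "roles.delete", "security.change_password", "auditoria.view"] := by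
  show PySem.Set.ofList (PERMISSION_DEFINITIONS.map (fun p => PySem.Dict.getD p "key" "")) = _
  rw [hKeys]; decide

theorem hPT : PERM_TABLE = [("dashboard", ["dashboard.view"]), ("mesas", ["mesas.view", "mesas.create", "mesas.edit", "mesas.delete"]), ("zonas", ["zonas.view", "zonas.create", "zonas.edit", "zonas.delete"]), ("categorias", ["categorias.view", "categorias.create", "categorias.edit", "categorias.delete"]), ("productos", ["productos.view", "productos.create", "productos.edit", "productos.availability", "productos.delete"]), ("ordenes", ["ordenes.view", "ordenes.create", "ordenes.items", "ordenes.deliver", "ordenes.cancel_item", "ordenes.ticket"]), ("caja", ["caja.view", "caja.open", "caja.close", "caja.movements", "caja.charge", "caja.cancel_order"]), ("cocina", ["cocina.view", "cocina.prepare"]), ("inventario", ["inventario.view", "inventario.create"]), ("reportes", ["reportes.view", "reportes.export"]), ("usuarios", ["usuarios.view", "usuarios.create", "usuarios.edit", "usuarios.delete", "usuarios.reset_password"]), ("roles", ["roles.view", "roles.create", "roles.edit", "roles.delete"]), ("security", ["security.change_password"]), ("auditoria", ["auditoria.view"])] := by decide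

theorem hPK : PERM_KEYS = ["dashboard.view", "mesas.view", "mesas.create", "mesas.edit", "mesas.delete", "zonas.view", "zonas.create", "zonas.edit", "zonas.delete", "categorias.view", "categorias.create", "categorias.edit", "categorias.delete", "productos.view", "productos.create", "productos.edit", "productos.availability", "productos.delete", "ordenes.view", "ordenes.create", "ordenes.items", "ordenes.deliver", "ordenes.cancel_item", "ordenes.ticket", "caja.view", "caja.open", "caja.close", "caja.movements", "caja.charge", "caja.cancel_order", "cocina.view", "cocina.prepare", "inventario.view", "inventario.create", "reportes.view", "reportes.export", "usuarios.view", "usuarios.create", "usuarios.edit", "usuarios.delete", "usuarios.reset_password", "roles.view", "roles.create", "roles.edit", "roles.delete", "security.change_password", "auditoria.view"] := by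
  show PERM_TABLE.flatMap (fun p => p.2) = _
  rw [hPT]; decide

-- filtering records on a key predicate, then projecting the key, is projecting then filtering
theorem filter_map_comm {a b : Type} (l : List a) (f : a -> b) (Q : b -> Bool) :
    (l.filter (fun x => Q (f x))).map f = (l.map f).filter Q := by
  induction l with
  | nil => rfl
  | cons x xs ih => by_cases h : Q (f x) = true <;> simp [h, ih]

-- the module loop finds nothing when the token matches no module name
theorem pvFindModule_none (c : String) (l : List (String × List String))
    (h : ∀ p ∈ l, (c == p.1) = false) : pvFindModule c l = none := by
  induction l with
  | nil => rfl
  | cons x xs ih =>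
      obtain ⟨m, ks⟩ := x
      simp only [pvFindModule]
      rw [h (m, ks) (List.mem_cons_self ..)]
      simp only [Bool.false_eq_true, if_false]
      exact ih (fun p hp => h p (List.mem_cons_of_mem _ hp))

theorem pvExpansion_no_module (c : String) (h : pvFindModule c PERM_TABLE = none) :
    pvExpansion c = if PERM_KEYS.contains c then [c] else [] := by
  unfold pvExpansion
  rw [h]

-- for an alias module c, A's filtered PERMISSION_DEFINITIONS keys equal B's expansion list
theorem alias_case (c : String)
    (hc : PySem.Dict.contains MODULE_PERMISSION_ALIASES c = true) :
    ((PERMISSION_DEFINITIONS.filter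
        (fun p => PySem.Str.startswith (PySem.Dict.getD p "key" "") (c ++ "."))).map
      (fun p => PySem.Dict.getD p "key" "")) = pvExpansion c := by
  have hcm : ((PERMISSION_DEFINITIONS.filter
      (fun p => PySem.Str.startswith (PySem.Dict.getD p "key" "") (c ++ "."))).map
      (fun p => PySem.Dict.getD p "key" ""))
      = (["dashboard.view", "mesas.view", "mesas.create", "mesas.edit", "mesas.delete", "zonas.view", "zonas.create", "zonas.edit", "zonas.delete", "categorias.view", "categorias.create", "categorias.edit", "categorias.delete", "productos.view", "productos.create", "productos.edit", "productos.availability", "productos.delete", "ordenes.view", "ordenes.create", "ordenes.items", "ordenes.deliver", "ordenes.cancel_item", "ordenes.ticket", "caja.view", "caja.open", "caja.close", "caja.movements", "caja.charge", "caja.cancel_order", "cocina.view", "cocina.prepare", "inventario.view", "inventario.create", "reportes.view", "reportes.export", "usuarios.view", "usuarios.create", "usuarios.edit", "usuarios.delete", "usuarios.reset_password", "roles.view", "roles.create", "roles.edit", "roles.delete", "security.change_password", "auditoria.view"] : List String).filter (fun k => PySem.Str.startswith k (c ++ ".")) := by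
    rw [← hKeys]
    exact filter_map_comm PERMISSION_DEFINITIONS (fun p => PySem.Dict.getD p "key" "")
      (fun k => PySem.Str.startswith k (c ++ "."))
  rw [hcm]
  have hmem : c ∈ MODULE_PERMISSION_ALIASES.keys :=
    (PySem.Dict.contains_iff_mem_keys _ _).mp hc
  simp only [PySem.Dict.keys_mk, MODULE_PERMISSION_ALIASES, List.map_cons, List.map_nil,
    List.mem_cons, List.not_mem_nil, or_false] at hmem
  rcases hmem with h|h|h|h|h|h|h|h|h|h|h|h <;> subst h <;> (unfold pvExpansion; rw [hPT, hPK]; decide)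

-- for an exact permission key c, B's expansion list is [c]
theorem exact_key_case (c : String)
    (hk : PySem.Set.contains ALL_PERMISSION_KEYS c = true) :
    pvExpansion c = [c] := by
  rw [hAK] at hk
  have hmem : c ∈ (["dashboard.view", "mesas.view", "mesas.create", "mesas.edit", "mesas.delete", "zonas.view", "zonas.create", "zonas.edit", "zonas.delete", "categorias.view", "categorias.create", "categorias.edit", "categorias.delete", "productos.view", "productos.create", "productos.edit", "productos.availability", "productos.delete", "ordenes.view", "ordenes.create", "ordenes.items", "ordenes.deliver", "ordenes.cancel_item", "ordenes.ticket", "caja.view", "caja.open", "caja.close", "caja.movements", "caja.charge", "caja.cancel_order", "cocina.view", "cocina.prepare", "inventario.view", "inventario.create", "reportes.view", "reportes.export", "usuarios.view", "usuarios.create", "usuarios.edit", "usuarios.delete", "usuarios.reset_password", "roles.view", "roles.create", "roles.edit", "roles.delete", "security.change_password", "auditoria.view"] : List String) := (PySem.Set.contains_iff _ _).mp hk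
  simp only [List.mem_cons, List.not_mem_nil, or_false] at hmem
  rcases hmem with h|h|h|h|h|h|h|h|h|h|h|h|h|h|h|h|h|h|h|h|h|h|h|h|h|h|h|h|h|h|h|h|h|h|h|h|h|h|h|h|h|h|h|h|h|h|h
    <;> subst h <;> (unfold pvExpansion; rw [hPT, hPK]; decide)

-- a token that is neither an alias nor a key expands to nothing
theorem miss_case (c : String)
    (hc : PySem.Dict.contains MODULE_PERMISSION_ALIASES c = false)
    (hk : PySem.Set.contains ALL_PERMISSION_KEYS c = false) :
    pvExpansion c = [] := by
  rw [hAK] at hk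
  by_cases hm : c ∈ (["dashboard", "mesas", "zonas", "categorias", "productos", "ordenes", "caja", "cocina", "inventario", "reportes", "usuarios", "roles", "security", "auditoria"] : List String)
  · simp only [List.mem_cons, List.not_mem_nil, or_false] at hm
    rcases hm with h|h|h|h|h|h|h|h|h|h|h|h|h|h <;> subst h <;>
      first
        | exact absurd hc (by decide)
        | (unfold pvExpansion; rw [hPT, hPK]; decide)
  · have hnone : pvFindModule c PERM_TABLE = none := by
      rw [hPT]
      apply pvFindModule_none
      intro p hp
      rw [beq_eq_false_iff_ne]
      intro he
      apply hm
      have hsub : ∀ p ∈ ([("dashboard", ["dashboard.view"]), ("mesas", ["mesas.view", "mesas.create", "mesas.edit", "mesas.delete"]), ("zonas", ["zonas.view", "zonas.create", "zonas.edit", "zonas.delete"]), ("categorias", ["categorias.view", "categorias.create", "categorias.edit", "categorias.delete"]), ("productos", ["productos.view", "productos.create", "productos.edit", "productos.availability", "productos.delete"]), ("ordenes", ["ordenes.view", "ordenes.create", "ordenes.items", "ordenes.deliver", "ordenes.cancel_item", "ordenes.ticket"]), ("caja", ["caja.view", "caja.open", "caja.close", "caja.movements", "caja.charge", "caja.cancel_order"]),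 ("cocina", ["cocina.view", "cocina.prepare"]), ("inventario", ["inventario.view", "inventario.create"]), ("reportes", ["reportes.view", "reportes.export"]), ("usuarios", ["usuarios.view", "usuarios.create", "usuarios.edit", "usuarios.delete", "usuarios.reset_password"]), ("roles", ["roles.view", "roles.create", "roles.edit", "roles.delete"]), ("security", ["security.change_password"]), ("auditoria", ["auditoria.view"])] : List (String × List String)), p.1 ∈ (["dashboard", "mesas", "zonas", "categorias", "productos", "ordenes", "caja", "cocina", "inventario", "reportes", "usuarios", "roles", "security", "auditoria"] : List String) := by decide
      exact he ▸ hsub p hp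
    rw [pvExpansion_no_module c hnone, hPK]
    have h2 : (["dashboard.view", "mesas.view", "mesas.create", "mesas.edit", "mesas.delete", "zonas.view", "zonas.create", "zonas.edit", "zonas.delete", "categorias.view", "categorias.create", "categorias.edit", "categorias.delete", "productos.view", "productos.create", "productos.edit", "productos.availability", "productos.delete", "ordenes.view", "ordenes.create", "ordenes.items", "ordenes.deliver", "ordenes.cancel_item", "ordenes.ticket", "caja.view", "caja.open", "caja.close", "caja.movements", "caja.charge", "caja.cancel_order", "cocina.view", "cocina.prepare", "inventario.view", "inventario.create", "reportes.view", "reportes.export", "usuarios.view", "usuarios.create", "usuarios.edit", "usuarios.delete", "usuarios.reset_password", "roles.view", "roles.create", "roles.edit", "roles.delete", "security.change_password", "auditoria.view"] : List String).contains c = false := by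
      cases h : (["dashboard.view", "mesas.view", "mesas.create", "mesas.edit", "mesas.delete", "zonas.view", "zonas.create", "zonas.edit", "zonas.delete", "categorias.view", "categorias.create", "categorias.edit", "categorias.delete", "productos.view", "productos.create", "productos.edit", "productos.availability", "productos.delete", "ordenes.view", "ordenes.create", "ordenes.items", "ordenes.deliver", "ordenes.cancel_item", "ordenes.ticket", "caja.view", "caja.open", "caja.close", "caja.movements", "caja.charge", "caja.cancel_order", "cocina.view", "cocina.prepare", "inventario.view", "inventario.create", "reportes.view", "reportes.export", "usuarios.view", "usuarios.create", "usuarios.edit", "usuarios.delete", "usuarios.reset_password", "roles.view", "roles.create", "roles.edit", "roles.delete", "security.change_password", "auditoria.view"] : List String).contains c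
      · rfl
      · exfalso
        have hmem : c ∈ (["dashboard.view", "mesas.view", "mesas.create", "mesas.edit", "mesas.delete", "zonas.view", "zonas.create", "zonas.edit", "zonas.delete", "categorias.view", "categorias.create", "categorias.edit", "categorias.delete", "productos.view", "productos.create", "productos.edit", "productos.availability", "productos.delete", "ordenes.view", "ordenes.create", "ordenes.items", "ordenes.deliver", "ordenes.cancel_item", "ordenes.ticket", "caja.view", "caja.open", "caja.close", "caja.movements", "caja.charge", "caja.cancel_order", "cocina.view", "cocina.prepare", "inventario.view", "inventario.create", "reportes.view", "reportes.export", "usuarios.view", "usuarios.create", "usuarios.edit", "usuarios.delete", "usuarios.reset_password", "roles.view", "roles.create", "roles.edit", "roles.delete", "security.change_password", "auditoria.view"] : List String) := List.contains_iff_mem.mp h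
        simp only [List.mem_cons, List.not_mem_nil, or_false] at hmem
        rcases hmem with h'|h'|h'|h'|h'|h'|h'|h'|h'|h'|h'|h'|h'|h'|h'|h'|h'|h'|h'|h'|h'|h'|h'|h'|h'|h'|h'|h'|h'|h'|h'|h'|h'|h'|h'|h'|h'|h'|h'|h'|h'|h'|h'|h'|h'|h'|h'
          <;> subst h' <;> exact absurd hk (by decide)
    rw [h2]
    rfl

-- A's per-value step is 'update with B's expansion of the stripped token'
theorem step_eq (expanded : List String) (value0 : String) :
    (let value := PySem.Str.strip value0
     if value = "" then expanded
     else if PySem.Dict.contains MODULE_PERMISSION_ALIASES value then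
       PySem.Set.update expanded
         ((PERMISSION_DEFINITIONS.filter
             (fun p => PySem.Str.startswith (PySem.Dict.getD p "key" "") (value ++ "."))).map
           (fun p => PySem.Dict.getD p "key" ""))
     else if PySem.Set.contains ALL_PERMISSION_KEYS value then
       PySem.Set.add expanded value
     else expanded)
    =
    PySem.Set.update expanded (pvExpansion (PySem.Str.strip value0)) := by
  dsimp only
  by_cases h0 : PySem.Str.strip value0 = ""
  · rw [h0, miss_case "" (by decide) (by rw [hAK]; decide)]
    simp
  · rw [if_neg h0]
    by_cases hc : PySem.Dict.contains MODULE_PERMISSION_ALIASES (PySem.Str.strip value0) = true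
    · rw [if_pos hc, alias_case _ hc]
    · rw [if_neg hc]
      by_cases hk : PySem.Set.contains ALL_PERMISSION_KEYS (PySem.Str.strip value0) = true
      · rw [if_pos hk, exact_key_case _ hk]
        rfl
      · rw [if_neg hk, miss_case _ (Bool.eq_false_iff.mpr hc) (Bool.eq_false_iff.mpr hk)]
        rfl

-- a fold of updates is one update with the flattened contributions
theorem foldl_update_flatMap (f : String -> List String) (l : List String) (s : List String) :
    l.foldl (fun acc v => PySem.Set.update acc (f v)) s = PySem.Set.update s (l.flatMap f) := by
  induction l generalizing s with
  | nil => simp [PySem.Set.update]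
  | cons x xs ih =>
      rw [List.foldl_cons, ih, List.flatMap_cons, PySem.Set.update_append]

theorem pv_core (l : List String) :
    (l.foldl
      (fun expanded value0 =>
        let value := PySem.Str.strip value0
        if value = "" then expanded
        else if PySem.Dict.contains MODULE_PERMISSION_ALIASES value then
          PySem.Set.update expanded
            ((PERMISSION_DEFINITIONS.filter
                (fun p => PySem.Str.startswith (PySem.Dict.getD p "key" "") (value ++ "."))).map
              (fun p => PySem.Dict.getD p "key" ""))
        else if PySem.Set.contains ALL_PERMISSION_KEYS value then
          PySem.Set.add expanded value
        else expanded)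
      PySem.Set.empty)
    = PySem.Set.ofList (l.flatMap (fun v => pvExpansion (PySem.Str.strip v))) := by
  calc l.foldl _ PySem.Set.empty
      = l.foldl (fun acc v => PySem.Set.update acc (pvExpansion (PySem.Str.strip v))) PySem.Set.empty := by
        congr 1
        funext expanded v
        exact step_eq expanded v
    _ = PySem.Set.update PySem.Set.empty (l.flatMap (fun v => pvExpansion (PySem.Str.strip v))) :=
        foldl_update_flatMap _ _ _
    _ = PySem.Set.ofList (l.flatMap (fun v => pvExpansion (PySem.Str.strip v))) :=
        PySem.Set.update_nil_left _

-- ===== VERDICT (by name: the statement is the Claim_ definition above) =====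
theorem expand_legacy_permissions_spec : Claim_equal_expand_legacy_permissions := by
  intro values _
  unfold Spec_expand_legacy_permissions expand_legacy_permissions expand_legacy_permissions_alt
  cases values with
  | none => exact pv_core []
  | some l => exact pv_core l
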